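-- pv_equiv track=rewrite | github.com/SeveriJoki/Ohjelmoinninperusteet-viikko6 | sähkönkulutus.py | tasoita_lista
-- ===== SOURCE A (Python) =====
-- def tasoita_lista(nested: list[list[list[str]]])->list[list[str]]:
--     """
--     Palautta tasoitetun listan sukeltaa sublistoihin tarvittaessa.
--
--     """
--
--     tulos = []
--
--     def sukella(lista: list):
--         """
--         Kulkee yhden iteraation alaspäin nested listassa ja tarvittaessa enemmän.
--         Palauttaa kaikki muuttujat ryhmiteltynä listoissa "tulos" listaan.
--         """
--         current = []
--         for obj in lista:
--             if isinstance(obj, list): #jos osutaan listaan ja currentissa on dataa tallennetaan ne "tulos" muuttujaan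
--                 if current:
--                     tulos.append(current)
--                     current = []
--                 sukella(obj) #uusi lista löytyi mennään syvemmälle
--             else:
--                 current.append(obj)
--         #listat käyty läpi, tallennetaan viimeiset muuttujat "tulos" muuttujaan
--         if current:
--             tulos.append(current)
--
--     sukella(nested)
--     return tulos
-- ===== SOURCE B (Python) =====
-- def tasoita_lista(nested: list[list[list[str]]]) -> list[list[str]]:
--     # On the declared type the recursion just yields every non-empty
--     # innermost list in order: a flat comprehension does it in one pass.
--     return [inner for outer in nested for inner in outer if inner]
-- ===== Notes on version B (the rewrite author's own statement) =====
-- stated objective: simpler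
-- what changed: Replaced the recursive helper that mutates shared state (tulos/current, flushing groups around each descent) with a single flat comprehension that collects the non-empty innermost lists in order, which is all the recursion can do on the declared list[list[list[str]]] type.
import Mathlib
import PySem

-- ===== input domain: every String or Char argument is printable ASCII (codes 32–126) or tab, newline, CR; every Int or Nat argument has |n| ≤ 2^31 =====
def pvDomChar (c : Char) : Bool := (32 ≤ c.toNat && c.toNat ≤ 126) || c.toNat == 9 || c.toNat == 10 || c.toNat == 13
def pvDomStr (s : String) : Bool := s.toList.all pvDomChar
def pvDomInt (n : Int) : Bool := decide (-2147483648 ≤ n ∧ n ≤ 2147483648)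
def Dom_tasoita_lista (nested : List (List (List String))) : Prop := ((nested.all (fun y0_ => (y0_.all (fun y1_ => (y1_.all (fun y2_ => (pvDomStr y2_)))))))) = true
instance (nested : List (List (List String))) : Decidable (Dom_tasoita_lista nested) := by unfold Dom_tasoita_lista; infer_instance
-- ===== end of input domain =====

-- B replaces A's recursive helper (shared tulos/current mutation) by a flat
-- one-pass comprehension collecting non-empty innermost lists; objective: simpler.

-- ===== PORT A =====
-- A's sukella at the innermost level: every obj is a str, so only the else
-- branch fires; current collects the elements, then is flushed if non-empty.
def pvSukella2 (tulos : List (List String)) (lista : List String) : List (List String) :=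
  let current := lista.foldl (fun c o => c ++ [o]) []
  if current ≠ [] then tulos ++ [current] else tulos

-- A's sukella one level up: every obj is a list, so only the isinstance
-- branch fires; current is flushed (if non-empty) before each descent and at the end.
def pvSukella1 (tulos : List (List String)) (lista : List (List String)) : List (List String) :=
  let st := lista.foldl
    (fun (p : List (List String) × List String) obj =>
      let p' := if p.2 ≠ [] then (p.1 ++ [p.2], ([] : List String)) else p
      (pvSukella2 p'.1 obj, p'.2))
    (tulos, [])
  if st.2 ≠ [] then st.1 ++ [st.2] else st.1

-- A's sukella at the top level (sukella nested): every obj is a list.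
def pvSukella0 (tulos : List (List String)) (lista : List (List (List String))) : List (List String) :=
  let st := lista.foldl
    (fun (p : List (List String) × List String) obj =>
      let p' := if p.2 ≠ [] then (p.1 ++ [p.2], ([] : List String)) else p
      (pvSukella1 p'.1 obj, p'.2))
    (tulos, [])
  if st.2 ≠ [] then st.1 ++ [st.2] else st.1

def tasoita_lista (nested : List (List (List String))) : List (List String) :=
  pvSukella0 [] nested

-- ===== PORT B =====
def tasoita_lista_alt (nested : List (List (List String))) : List (List String) :=
  ((nested.flatMap id).filter (fun inner => inner ≠ []))

-- ===== PRECONDITION & SPEC =====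
def Spec_tasoita_lista (nested : List (List (List String))) (out : List (List String)) : Prop := out = tasoita_lista_alt nested
instance (nested : List (List (List String))) (out : List (List String)) : Decidable (Spec_tasoita_lista nested out) := by unfold Spec_tasoita_lista; infer_instance

-- ===== CLAIM (what is proved, stated in full; the proofs are below) =====
def Claim_equal_tasoita_lista : Prop := ∀ (nested : List (List (List String))), Dom_tasoita_lista nested → Spec_tasoita_lista nested (tasoita_lista nested)

-- ===== LEMMAS AND PROOFS =====

theorem pv_foldl_snoc (l : List String) (c : List String) :
    l.foldl (fun c o => c ++ [o]) c = c ++ l := by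
  induction l generalizing c with
  | nil => simp
  | cons x xs ih => simp [List.foldl, ih]

theorem pvSukella2_eq (tulos : List (List String)) (lista : List String) :
    pvSukella2 tulos lista = tulos ++ ([lista].filter (fun inner => inner ≠ [])) := by
  unfold pvSukella2
  have h := pv_foldl_snoc lista []
  simp only [List.nil_append] at h
  rw [h]
  by_cases he : lista = [] <;> simp [he]

-- At the middle and top levels current stays empty, so the pair-foldl is a plain foldl.
theorem pv_foldl_pair_eq {α : Type} (g : List (List String) → α → List (List String))
    (l : List α) (tulos : List (List String)) :
    l.foldl
      (fun (p : List (List String) × List String) obj =>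
        let p' := if p.2 ≠ [] then (p.1 ++ [p.2], ([] : List String)) else p
        (g p'.1 obj, p'.2))
      (tulos, []) = (l.foldl g tulos, []) := by
  induction l generalizing tulos with
  | nil => rfl
  | cons x xs ih =>
    simp only [List.foldl, ne_eq, not_true_eq_false, if_false]
    simpa using ih (g tulos x)

theorem pvSukella1_eq (tulos : List (List String)) (lista : List (List String)) :
    pvSukella1 tulos lista = tulos ++ (lista.filter (fun inner => inner ≠ [])) := by
  unfold pvSukella1
  rw [pv_foldl_pair_eq]
  simp only [ne_eq, not_true_eq_false, if_false]
  induction lista generalizing tulos with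
  | nil => simp
  | cons x xs ih =>
    simp only [List.foldl, ih, pvSukella2_eq]
    by_cases he : x = [] <;> simp [he]

theorem pvSukella0_eq (tulos : List (List String)) (lista : List (List (List String))) :
    pvSukella0 tulos lista = tulos ++ ((lista.flatMap id).filter (fun inner => inner ≠ [])) := by
  unfold pvSukella0
  rw [pv_foldl_pair_eq]
  simp only [ne_eq, not_true_eq_false, if_false]
  induction lista generalizing tulos with
  | nil => simp
  | cons x xs ih =>
    simp [List.foldl, ih, pvSukella1_eq, List.filter_append]

-- ===== VERDICT (by name: the statement is the Claim_ definition above) =====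
theorem tasoita_lista_spec : Claim_equal_tasoita_lista := by
  intro nested _
  unfold Spec_tasoita_lista tasoita_lista tasoita_lista_alt
  simp [pvSukella0_eq]
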